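-- pv_equiv track=rewrite | github.com/the-riviera-kid/learning-by-doing | 05-learn-you-a-testing-for-great-good/blanking.py | blank
-- ===== SOURCE A (Python) =====
-- def blank(target_word, characters):
--     if not isinstance(target_word, str):
--         raise TypeError('This is no good for hangman!')
--     if target_word:
--         if characters:
--             return ''.join(x if x in characters else '_' for x in target_word)
--         else:
--             return '_' * len(target_word)
--     else:
--         return ''
-- ===== SOURCE B (Python) =====
-- def blank(target_word, characters):
--     if not isinstance(target_word, str):
--         raise TypeError('This is no good for hangman!')
--     table = {ord(c): (c if c in characters else '_') for c in set(target_word)}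
--     return target_word.translate(table)
-- ===== Notes on version B (the rewrite author's own statement) =====
-- stated objective: faster
-- what changed: B replaces A's three-way branch and per-character streamed membership join by precomputing a str.translate table over the distinct characters of target_word, then doing a single translate pass.
import Mathlib
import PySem

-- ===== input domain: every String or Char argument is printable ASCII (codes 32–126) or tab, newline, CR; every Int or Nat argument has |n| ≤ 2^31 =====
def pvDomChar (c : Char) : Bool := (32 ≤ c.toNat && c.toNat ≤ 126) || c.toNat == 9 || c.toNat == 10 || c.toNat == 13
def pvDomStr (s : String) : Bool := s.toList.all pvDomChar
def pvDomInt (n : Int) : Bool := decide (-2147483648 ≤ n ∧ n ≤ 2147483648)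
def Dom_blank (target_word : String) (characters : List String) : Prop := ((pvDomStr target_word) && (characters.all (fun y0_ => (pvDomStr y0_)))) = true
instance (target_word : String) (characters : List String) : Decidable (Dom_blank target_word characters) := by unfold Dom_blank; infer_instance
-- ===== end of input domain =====

-- B replaces A's three-way branch and streamed membership test by a translation
-- table precomputed over the distinct characters of target_word (idiomatic str.translate).

-- ===== PORT A =====
def blank (target_word : String) (characters : List String) : String :=
  -- isinstance(target_word, str) always holds under the type convention
  if target_word ≠ "" then
    if characters ≠ [] then
      PySem.Str.join "" (target_word.toList.map
        (fun x => if characters.contains (String.ofList [x]) then String.ofList [x] else "_"))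
    else
      String.ofList (PySem.List.pyRepeat ['_'] (PySem.Str.len target_word))  -- '_' * len(target_word)
  else ""

-- ===== PORT B =====
def blank_alt (target_word : String) (characters : List String) : String :=
  let table : PySem.Dict Int String :=
    (PySem.Set.ofList target_word.toList).foldl
      (fun d c => d.insert (c.toNat : Int)
        (if characters.contains (String.ofList [c]) then String.ofList [c] else "_"))
      PySem.Dict.empty
  -- target_word.translate(table): chars not in the table are kept
  PySem.Str.join "" (target_word.toList.map
    (fun c => (table.get? (c.toNat : Int)).getD (String.ofList [c])))

-- ===== PRECONDITION & SPEC =====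
def Spec_blank (target_word : String) (characters : List String) (out : String) : Prop := out = blank_alt target_word characters
instance (target_word : String) (characters : List String) (out : String) : Decidable (Spec_blank target_word characters out) := by unfold Spec_blank; infer_instance

-- ===== CLAIM (what is proved, stated in full; the proofs are below) =====
def Claim_equal_blank : Prop := ∀ (target_word : String) (characters : List String), Dom_blank target_word characters → Spec_blank target_word characters (blank target_word characters)

-- ===== LEMMAS AND PROOFS =====

-- lookup in a fold of inserts at keys not equal to k is unchanged
lemma get?_foldl_insert_of_ne (g : Char → Int) (f : Char → String) (k : Int) :
    ∀ (L : List Char) (d : PySem.Dict Int String), (∀ x ∈ L, g x ≠ k) →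
      (L.foldl (fun d x => d.insert (g x) (f x)) d).get? k = d.get? k := by
  intro L
  induction L with
  | nil => intro d _; rfl
  | cons x L ih =>
      intro d h
      simp only [List.foldl_cons]
      rw [ih _ (fun y hy => h y (List.mem_cons_of_mem _ hy))]
      exact PySem.Dict.get?_insert_of_ne _ _ (Ne.symm (h x List.mem_cons_self))

-- lookup at the (injective) key of a member returns its value
lemma get?_foldl_insert_mem (g : Char → Int) (f : Char → String)
    (hg : Function.Injective g) :
    ∀ (L : List Char) (d : PySem.Dict Int String) (c : Char), c ∈ L →
      (L.foldl (fun d x => d.insert (g x) (f x)) d).get? (g c) = some (f c) := by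
  intro L
  induction L with
  | nil => intro d c hc; exact absurd hc (List.not_mem_nil)
  | cons x L ih =>
      intro d c hc
      simp only [List.foldl_cons]
      by_cases hm : c ∈ L
      · exact ih _ c hm
      · have hcx : c = x := by
          rcases List.mem_cons.mp hc with h | h
          · exact h
          · exact absurd h hm
        subst hcx
        rw [get?_foldl_insert_of_ne g f (g c) L _
              (fun y hy he => hm ((hg he) ▸ hy))]
        exact PySem.Dict.get?_insert_self _ _ _

lemma ord_injective : Function.Injective (fun c : Char => (c.toNat : Int)) := by
  intro a b h
  have h1 : (a.toNat : Int) = (b.toNat : Int) := h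
  have h2 : a.toNat = b.toNat := by exact_mod_cast h1
  exact Char.ext (UInt32.toNat_inj.mp h2)

-- both ports' character lists agree
lemma blank_toList_eq (target_word : String) (characters : List String) :
    (blank target_word characters).toList = (blank_alt target_word characters).toList := by
  simp only [blank, blank_alt]
  have hmap : ∀ c ∈ target_word.toList,
      (((PySem.Set.ofList target_word.toList).foldl
          (fun d x => d.insert (x.toNat : Int)
            (if characters.contains (String.ofList [x]) then String.ofList [x] else "_"))
          PySem.Dict.empty).get? (c.toNat : Int)).getD (String.ofList [c])
        = (if characters.contains (String.ofList [c]) then String.ofList [c] else "_") := by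
    intro c hc
    rw [get?_foldl_insert_mem _ _ ord_injective _ _ c
         ((PySem.Set.mem_ofList _ _).mpr hc)]
    rfl
  rw [List.map_congr_left hmap]
  by_cases h0 : target_word = ""
  · simp [h0]
  · simp only [h0, ne_eq, not_false_iff, if_true]
    by_cases hch : characters = []
    · subst hch
      simp only [not_true_eq_false, if_false, List.contains_nil, Bool.false_eq_true,
        PySem.Str.toList_join]
      rw [PySem.List.pyRepeat_singleton]
      have h3 : List.map String.toList (List.map (fun _ => ("_" : String)) target_word.toList)
          = (List.replicate target_word.toList.length '_').map (fun c => [c]) := by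
        simp
      simp only [h3, String.toList_empty, PySem.Chars.join_nil_singletons, PySem.Str.len,
        Int.toNat_natCast, String.toList_ofList]
    · simp [hch]

-- ===== VERDICT (by name: the statement is the Claim_ definition above) =====
theorem blank_spec : Claim_equal_blank := by
  intro target_word characters _
  unfold Spec_blank
  exact String.toList_inj.mp (blank_toList_eq target_word characters)
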